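-- pv_equiv track=rewrite | github.com/samkrimmel/unit4 | stringUnion.py | stringUnion
-- ===== SOURCE A (Python) =====
-- def stringUnion(word1,word2):
--     final = ''
--     for ch in word1:
--         if not ch.lower() in final.lower():
--             final += ch.lower()
--     for ch in word2:
--         if not ch.lower() in final.lower():
--             final += ch.lower()
--     return final
-- ===== SOURCE B (Python) =====
-- def stringUnion(word1, word2):
--     s = [ch.lower() for ch in word1] + [ch.lower() for ch in word2]
--     first = {ch: i for i, ch in reversed(list(enumerate(s)))}
--     return ''.join(sorted(first, key=first.get))
-- ===== Notes on version B (the rewrite author's own statement) =====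
-- stated objective: alternative
-- what changed: Instead of growing the output with membership scans, B builds a first-occurrence-index table by folding a dict back-to-front over the reversed enumerated lowercased concatenation (later, i.e. earlier-index, writes overwrite), then sorts the distinct characters by that index and joins them.
import Mathlib
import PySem

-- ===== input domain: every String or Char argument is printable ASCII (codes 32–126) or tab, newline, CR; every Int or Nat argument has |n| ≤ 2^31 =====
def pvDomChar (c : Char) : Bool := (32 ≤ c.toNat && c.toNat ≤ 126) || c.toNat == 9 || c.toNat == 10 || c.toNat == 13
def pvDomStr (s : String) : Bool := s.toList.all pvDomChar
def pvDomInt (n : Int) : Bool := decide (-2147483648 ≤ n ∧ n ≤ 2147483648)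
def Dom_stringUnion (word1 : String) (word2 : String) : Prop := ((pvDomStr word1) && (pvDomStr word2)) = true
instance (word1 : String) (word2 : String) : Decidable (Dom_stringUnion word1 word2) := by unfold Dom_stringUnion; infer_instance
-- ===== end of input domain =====

-- B replaces A's membership-scanning append loops by a back-to-front fold building a first-occurrence-index dict over the reversed enumerated lowered concatenation, then sorts the distinct chars by that index (alternative algorithm; same measured cost).


-- ===== PORT A =====
-- A's loop body: append ch.lower() unless it already occurs (substring test) in final.lower()
def stringUnionStep (final : List Char) (ch : Char) : List Char :=
  if ¬ PySem.Chars.isIn (PySem.Chars.lower [ch]) (PySem.Chars.lower final) then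
    final ++ PySem.Chars.lower [ch]
  else final

def stringUnion (word1 : String) (word2 : String) : String :=
  let final := word1.toList.foldl stringUnionStep []
  let final := word2.toList.foldl stringUnionStep final
  String.ofList final

-- ===== PORT B =====
-- Source B: s = [ch.lower() for ch in word1] + [ch.lower() for ch in word2]  (each ch.lower() is one char: lowerChar, exact on ASCII);
--       first = {ch: i for i, ch in reversed(list(enumerate(s)))};  return ''.join(sorted(first, key=first.get))
def stringUnion_alt (word1 : String) (word2 : String) : String :=
  let s : List Char := word1.toList.map PySem.Chars.lowerChar ++ word2.toList.map PySem.Chars.lowerChar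
  let first : PySem.Dict Char Int :=
    ((PySem.List.enumerate s 0).reverse).foldl (fun d p => d.insert p.2 p.1) PySem.Dict.empty
  String.ofList (PySem.List.sorted first.keys (fun c => first.getD c 0) false)

-- ===== PRECONDITION & SPEC =====
def Spec_stringUnion (word1 : String) (word2 : String) (out : String) : Prop := out = stringUnion_alt word1 word2
instance (word1 : String) (word2 : String) (out : String) : Decidable (Spec_stringUnion word1 word2 out) := by unfold Spec_stringUnion; infer_instance

-- ===== CLAIM (what is proved, stated in full; the proofs are below) =====
def Claim_equal_stringUnion : Prop := ∀ (word1 : String) (word2 : String), Dom_stringUnion word1 word2 → Spec_stringUnion word1 word2 (stringUnion word1 word2)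

-- ===== LEMMAS AND PROOFS =====

theorem charToNat_le {c d : Char} (h : c ≤ d) : c.toNat ≤ d.toNat :=
  UInt32.le_iff_toNat_le.mp (Char.le_def.mp h)

-- Python's per-character lower is idempotent
theorem lowerChar_idem (c : Char) :
    PySem.Chars.lowerChar (PySem.Chars.lowerChar c) = PySem.Chars.lowerChar c := by
  unfold PySem.Chars.lowerChar PySem.Chars.isupper
  split_ifs with h1 h2 <;> try rfl
  exfalso
  simp only [Bool.and_eq_true, decide_eq_true_eq] at h1 h2
  have hA : (65:Nat) ≤ c.toNat := charToNat_le h1.1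
  have hZ : c.toNat ≤ 90 := charToNat_le h1.2
  have hv : ((c.toNat + 32 : Nat)).isValidChar := by unfold Nat.isValidChar; omega
  have ht : (Char.ofNat (c.toNat + 32)).toNat = c.toNat + 32 := by
    rw [Char.toNat_ofNat, if_pos hv]
  have h90 : (Char.ofNat (c.toNat + 32)).toNat ≤ 90 := charToNat_le h2.2
  omega

-- a one-char substring test is membership
theorem isIn_singleton (a : Char) (l : List Char) :
    PySem.Chars.isIn [a] l = l.contains a := by
  by_cases h : a ∈ l
  · rw [List.contains_iff_mem.mpr h, PySem.Chars.isIn_iff_infix]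
    exact (List.singleton_infix_iff a l).mpr h
  · have h1 : l.contains a = false := by simpa using h
    rw [h1, PySem.Chars.isIn_eq_false_iff]
    exact fun hinf => h ((List.singleton_infix_iff a l).mp hinf)

-- A's loop, on an accumulator of lowercase-fixed chars, is the ordered-set insertion of the lowered chars
theorem foldl_step_eq_add (cs : List Char) (acc : List Char)
    (hacc : ∀ c ∈ acc, PySem.Chars.lowerChar c = c) :
    cs.foldl stringUnionStep acc
      = (cs.map PySem.Chars.lowerChar).foldl PySem.Set.add acc := by
  induction cs generalizing acc with
  | nil => rfl
  | cons ch cs ih =>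
    have hlow : PySem.Chars.lower acc = acc := by
      unfold PySem.Chars.lower
      exact (List.map_congr_left hacc).trans (List.map_id _)
    simp only [List.foldl_cons, List.map_cons]
    have hstep : stringUnionStep acc ch = PySem.Set.add acc (PySem.Chars.lowerChar ch) := by
      unfold stringUnionStep
      rw [hlow]
      simp only [PySem.Chars.lower, List.map_cons, List.map_nil]
      rw [isIn_singleton]
      unfold PySem.Set.add
      split_ifs <;> simp_all
    rw [hstep]
    apply ih
    intro c hc
    unfold PySem.Set.add at hc
    split_ifs at hc with hcnt
    · exact hacc c hc
    · rcases List.mem_append.mp hc with h | h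
      · exact hacc c h
      · simp at h; rw [h]; exact lowerChar_idem ch

-- the dict-building fold: final lookup = last write, i.e. first match in l.reverse, else the start dict
theorem get?_foldl_insert_swap (l : List (Int × Char)) (d : PySem.Dict Char Int) (c : Char) :
    (l.foldl (fun d p => d.insert p.2 p.1) d).get? c =
      match l.reverse.find? (fun p => p.2 == c) with
      | some p => some p.1
      | none => d.get? c := by
  induction l generalizing d with
  | nil => rfl
  | cons p l ih =>
    simp only [List.foldl_cons, List.reverse_cons]
    rw [ih, List.find?_append]
    cases h : l.reverse.find? (fun q => q.2 == c) with
    | some q => simp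
    | none =>
      simp only [Option.none_or]
      by_cases hc : p.2 = c
      · subst hc; simp [PySem.Dict.get?_insert_self, List.find?]
      · rw [PySem.Dict.get?_insert_of_ne _ _ (Ne.symm hc)]
        have hb : (p.2 == c) = false := by simpa using hc
        simp [List.find?, hb]

-- first match of c in an enumeration is c's first index
theorem find?_enumerate_eq (s : List Char) (c : Char) : ∀ k : Int,
    (PySem.List.enumerate s k).find? (fun p => p.2 == c) =
      (PySem.List.index? s c).map (fun i : Nat => ((k + (i : Int)), c)) := by
  induction s with
  | nil => intro k; simp [PySem.List.enumerate_nil, PySem.List.index?_eq_idxOf?]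
  | cons x t ih =>
    intro k
    rw [PySem.List.enumerate_cons]
    by_cases hx : x = c
    · subst hx
      rw [PySem.List.index?_cons_self]
      simp [List.find?]
    · rw [PySem.List.index?_cons_of_ne t hx]
      rw [List.find?_cons_of_neg (by simpa using hx), ih (k + 1)]
      cases PySem.List.index? t c with
      | none => rfl
      | some i => simp only [Option.map_some]; congr 1; push_cast; ring_nf

-- the value table: first.get? c = c's first index in s
theorem first_get? (s : List Char) (c : Char) :
    (((PySem.List.enumerate s 0).reverse).foldl (fun d p => d.insert p.2 p.1)
        PySem.Dict.empty).get? c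
      = (PySem.List.index? s c).map (fun i : Nat => (i : Int)) := by
  rw [get?_foldl_insert_swap, List.reverse_reverse, find?_enumerate_eq]
  cases PySem.List.index? s c with
  | none => simp [PySem.Dict.get?_empty]
  | some i => simp

-- the key list: first.keys = the distinct chars of s, in reverse-of-last-occurrence order
theorem first_keys (s : List Char) :
    (((PySem.List.enumerate s 0).reverse).foldl (fun d p => d.insert p.2 p.1)
        PySem.Dict.empty).keys
      = PySem.Set.ofList s.reverse := by
  rw [PySem.Dict.keys_foldl_insert_key ((PySem.List.enumerate s 0).reverse) (fun p => p.2) (fun _ p => p.1) PySem.Dict.empty]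
  rw [PySem.Dict.keys_empty, PySem.Set.update_nil_left]
  congr 1
  rw [List.map_reverse, PySem.List.map_snd_enumerate]

-- dedup keeps first occurrences, so its order is strictly increasing in first index
theorem pairwise_idx (s : List Char) :
    (PySem.List.dedup s).Pairwise
      (fun a b => (PySem.List.index? s a).getD 0 < (PySem.List.index? s b).getD 0) := by
  induction s with
  | nil => simp
  | cons x t ih =>
    rw [PySem.List.dedup_eq_ofList] at *
    rw [PySem.Set.ofList_cons]
    constructor
    · intro b hb
      have hbt : b ∈ PySem.Set.ofList t ∧ b ≠ x := by
        simpa [PySem.Set.discard] using hb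
      have hbx : x ≠ b := fun h => hbt.2 h.symm
      obtain ⟨j, hj⟩ := Option.isSome_iff_exists.mp
        ((PySem.List.index?_isSome_iff _ _).mpr ((PySem.Set.mem_ofList _ _).mp hbt.1))
      rw [PySem.List.index?_cons_self, PySem.List.index?_cons_of_ne t hbx, hj]
      simp
    · have hsub : (PySem.Set.discard (PySem.Set.ofList t) x).Sublist (PySem.Set.ofList t) := by
        simp [PySem.Set.discard]
      apply List.Pairwise.imp_of_mem _ (List.Pairwise.sublist hsub ih)
      intro a b ha hb hab
      have ha' : a ∈ PySem.Set.ofList t ∧ a ≠ x := by simpa [PySem.Set.discard] using ha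
      have hb' : b ∈ PySem.Set.ofList t ∧ b ≠ x := by simpa [PySem.Set.discard] using hb
      have hax : x ≠ a := fun h => ha'.2 h.symm
      have hbx : x ≠ b := fun h => hb'.2 h.symm
      have hat : a ∈ t := (PySem.Set.mem_ofList _ _).mp ha'.1
      have hbt : b ∈ t := (PySem.Set.mem_ofList _ _).mp hb'.1
      obtain ⟨i, hi⟩ := Option.isSome_iff_exists.mp ((PySem.List.index?_isSome_iff _ _).mpr hat)
      obtain ⟨j, hj⟩ := Option.isSome_iff_exists.mp ((PySem.List.index?_isSome_iff _ _).mpr hbt)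
      rw [PySem.List.index?_cons_of_ne t hax, PySem.List.index?_cons_of_ne t hbx, hi, hj]
      rw [hi, hj] at hab
      simpa using hab

-- ===== VERDICT (by name: the statement is the Claim_ definition above) =====
theorem stringUnion_spec : Claim_equal_stringUnion := by
  intro word1 word2 _
  unfold Spec_stringUnion stringUnion stringUnion_alt
  simp only []
  set s : List Char :=
    word1.toList.map PySem.Chars.lowerChar ++ word2.toList.map PySem.Chars.lowerChar with hs
  set first : PySem.Dict Char Int :=
    ((PySem.List.enumerate s 0).reverse).foldl (fun d p => d.insert p.2 p.1)
      PySem.Dict.empty with hf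
  -- A's side is the ordered dedup of s
  have hA : (word2.toList.foldl stringUnionStep (word1.toList.foldl stringUnionStep []))
      = PySem.List.dedup s := by
    rw [foldl_step_eq_add _ [] (by simp),
        foldl_step_eq_add _ _ (by
          intro c hc
          have := PySem.Set.nodup_ofList (word1.toList.map PySem.Chars.lowerChar)
          have hmem : c ∈ PySem.Set.ofList (word1.toList.map PySem.Chars.lowerChar) := by
            exact hc
          have := (PySem.Set.mem_ofList _ _).mp hmem
          obtain ⟨a, _, rfl⟩ := List.mem_map.mp this
          exact lowerChar_idem a)]
    rw [PySem.List.dedup_eq_ofList, hs, PySem.Set.ofList_eq_foldl, List.foldl_append]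
  rw [hA]
  -- B's side: sorting the keys by first index recovers the dedup order
  have hperm : (PySem.List.dedup s).Perm first.keys := by
    rw [hf, first_keys]
    refine (List.perm_ext_iff_of_nodup (PySem.List.nodup_dedup s)
      (PySem.Set.nodup_ofList _)).mpr ?_
    intro a
    simp [PySem.Set.mem_ofList]
  have hpair : (PySem.List.dedup s).Pairwise
      (fun a b => first.getD a 0 < first.getD b 0) := by
    apply List.Pairwise.imp_of_mem _ (pairwise_idx s)
    intro a b ha hb hab
    have hat : a ∈ s := (PySem.List.mem_dedup _ _).mp ha
    have hbt : b ∈ s := (PySem.List.mem_dedup _ _).mp hb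
    obtain ⟨i, hi⟩ := Option.isSome_iff_exists.mp ((PySem.List.index?_isSome_iff _ _).mpr hat)
    obtain ⟨j, hj⟩ := Option.isSome_iff_exists.mp ((PySem.List.index?_isSome_iff _ _).mpr hbt)
    rw [PySem.Dict.getD_eq_get?_getD, PySem.Dict.getD_eq_get?_getD, hf, first_get?,
        first_get?, hi, hj]
    rw [hi, hj] at hab
    simp only [Option.map_some, Option.getD_some] at hab ⊢
    exact_mod_cast hab
  rw [PySem.List.sorted_eq_of_perm_of_pairwise_lt _ _ _ hperm hpair]
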